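-- pv_equiv track=rewrite | github.com/Nekmo/wavefunction-mapmaking | mapmaking/tiles.py | frontiers_from_name
-- ===== SOURCE A (Python) =====
-- def frontiers_from_name(fname):
--     fname = fname.partition('.')[0]
--     frontiers = []
--     for ii in range(3):
--         _f, _, fname = fname.partition('-')
--         frontiers.append(_f)
--     if '-' in fname:
--         _f, _, special = fname.partition('-')
--         frontiers.append(_f)
--     else:
--         frontiers.append(fname)
--         special = ''
--     return frontiers, special
-- ===== SOURCE B (Python) =====
-- def frontiers_from_name(fname):
--     base = fname.partition('.')[0]
--     parts = base.split('-', 4)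
--     frontiers = parts[:4] + [''] * (4 - len(parts))
--     special = parts[4] if len(parts) > 4 else ''
--     return frontiers, special
-- ===== Notes on version B (the rewrite author's own statement) =====
-- stated objective: simpler
-- what changed: Replaces A's three-iteration partition loop plus a conditional fourth partition by one bounded split with maxsplit 4 followed by slice-and-pad of the first four pieces.
import Mathlib
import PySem

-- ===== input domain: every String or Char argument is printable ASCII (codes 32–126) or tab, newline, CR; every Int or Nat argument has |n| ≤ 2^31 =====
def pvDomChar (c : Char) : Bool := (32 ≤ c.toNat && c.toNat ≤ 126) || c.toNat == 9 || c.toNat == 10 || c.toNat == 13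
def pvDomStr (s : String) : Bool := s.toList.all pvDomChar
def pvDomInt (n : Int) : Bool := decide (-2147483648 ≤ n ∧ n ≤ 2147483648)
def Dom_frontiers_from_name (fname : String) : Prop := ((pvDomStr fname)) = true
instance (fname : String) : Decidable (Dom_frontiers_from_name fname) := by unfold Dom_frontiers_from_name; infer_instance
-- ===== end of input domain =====

-- B replaces A's three-iteration partition loop plus conditional fourth partition by one
-- bounded split('-', 4) followed by slice-and-pad (objective: simpler; same cost).

-- ===== PORT A =====
-- exact port of Python's s.partition(sep) for a single-character sep, restricted to the
-- (before, after) components A actually uses (when sep is absent: (s, ''))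
def pvPart (c : Char) : List Char → List Char × List Char
  | [] => ([], [])
  | a :: rest =>
      if a = c then ([], rest)
      else
        let p := pvPart c rest
        (a :: p.1, p.2)

def frontiers_from_name (fname : String) : List String × String :=
  let s := (pvPart '.' fname.toList).1
  let st := (PySem.List.pyRange 0 3 1).foldl
      (fun (st : List (List Char) × List Char) _ =>
        let p := pvPart '-' st.2
        (st.1 ++ [p.1], p.2)) ([], s)
  if st.2.contains '-' then
    let p := pvPart '-' st.2
    ((st.1 ++ [p.1]).map String.ofList, String.ofList p.2)
  else
    ((st.1 ++ [st.2]).map String.ofList, "")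

-- ===== PORT B =====
def frontiers_from_name_alt (fname : String) : List String × String :=
  let base := fname.toList.takeWhile (· ≠ '.')   -- fname.partition('.')[0]
  let parts := PySem.Chars.splitOnMax base ['-'] 4   -- base.split('-', 4)
  let frontiers := parts.take 4 ++ List.replicate (4 - parts.length) []
  let special := if 4 < parts.length then parts.getD 4 [] else []
  (frontiers.map String.ofList, String.ofList special)

-- ===== PRECONDITION & SPEC =====
def Spec_frontiers_from_name (fname : String) (out : List String × String) : Prop := out = frontiers_from_name_alt fname
instance (fname : String) (out : List String × String) : Decidable (Spec_frontiers_from_name fname out) := by unfold Spec_frontiers_from_name; infer_instance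

-- ===== CLAIM (what is proved, stated in full; the proofs are below) =====
def Claim_equal_frontiers_from_name : Prop := ∀ (fname : String), Dom_frontiers_from_name fname → Spec_frontiers_from_name fname (frontiers_from_name fname)

-- ===== LEMMAS AND PROOFS =====

-- recursive characterisation of split(sep, m) for a single-char sep, phrased via pvPart
def splitAux (c : Char) : Nat → List Char → List (List Char)
  | 0, l => [l]
  | m + 1, l =>
      if l.contains c then (pvPart c l).1 :: splitAux c m (pvPart c l).2 else [l]

def mapHead (f : List Char → List Char) : List (List Char) → List (List Char)
  | [] => []
  | x :: xs => f x :: xs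

theorem pvPart_of_not_contains (c : Char) (l : List Char) (h : l.contains c = false) :
    pvPart c l = (l, []) := by
  induction l with
  | nil => rfl
  | cons a rest ih =>
      simp only [List.contains_cons, Bool.or_eq_false_iff, beq_eq_false_iff_ne] at h
      have hac : ¬ a = c := fun e => h.1 e.symm
      simp [pvPart, hac, ih h.2]

theorem go_eq (c : Char) (fuel : Nat) :
    ∀ (m : Nat) (l cur : List Char) (acc : List (List Char)), l.length < fuel →
      PySem.Chars.splitOnMax.go [c] fuel m l cur acc
        = acc.reverse ++ mapHead (cur.reverse ++ ·) (splitAux c m l) := by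
  induction fuel with
  | zero => intro m l cur acc h; omega
  | succ fuel ih =>
      intro m l cur acc h
      match m, l with
      | 0, l =>
          cases l <;> simp [PySem.Chars.splitOnMax.go, splitAux, mapHead]
      | m + 1, [] =>
          simp [PySem.Chars.splitOnMax.go, splitAux, mapHead]
      | m + 1, a :: rest =>
          simp only [List.length_cons] at h
          by_cases hac : a = c
          · subst hac
            have hlen : rest.length < fuel := by omega
            rw [PySem.Chars.splitOnMax.go]
            simp [List.isPrefixOf, ih m rest [] (cur.reverse :: acc) hlen, splitAux,
                  pvPart, mapHead]
            cases splitAux a m rest <;> rfl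
          · have hpre : List.isPrefixOf [c] (a :: rest) = false := by
              simp [List.isPrefixOf]; exact fun hca => hac hca.symm
            rw [PySem.Chars.splitOnMax.go]
            simp only [hpre, Bool.false_eq_true, if_false, if_neg (by omega : ¬ m + 1 = 0)]
            rw [ih (m + 1) rest (a :: cur) acc (by omega)]
            have hca : ¬ c = a := fun e => hac e.symm
            by_cases hr : c ∈ rest
            · simp [splitAux, pvPart, hac, hca, hr, mapHead]
            · simp [splitAux, pvPart, hac, hca, hr, mapHead]

theorem splitOnMax_eq (c : Char) (l : List Char) (k : Nat) :
    PySem.Chars.splitOnMax l [c] (k : Int) = splitAux c k l := by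
  rw [PySem.Chars.splitOnMax]
  rw [if_neg (by omega : ¬ (k : Int) < 0)]
  rw [go_eq c (l.length + 1) (k : Int).toNat l [] [] (by omega)]
  have : ((k : Int)).toNat = k := by omega
  rw [this]
  cases hk : splitAux c k l with
  | nil => simp [mapHead]
  | cons x xs => simp [mapHead]

theorem takeWhile_eq_pvPart (l : List Char) :
    l.takeWhile (· ≠ '.') = (pvPart '.' l).1 := by
  induction l with
  | nil => rfl
  | cons a rest ih =>
      by_cases h : a = '.'
      · simp [List.takeWhile_cons, pvPart, h]
      · simp [List.takeWhile_cons, pvPart, h]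
        simpa using ih

-- ===== VERDICT (by name: the statement is the Claim_ definition above) =====
theorem frontiers_from_name_spec : Claim_equal_frontiers_from_name := by
  intro fname _
  unfold Spec_frontiers_from_name frontiers_from_name frontiers_from_name_alt
  rw [show (4 : Int) = ((4 : Nat) : Int) from rfl]
  have hrange : PySem.List.pyRange 0 3 1 = [0, 1, 2] := by decide
  simp only [takeWhile_eq_pvPart, splitOnMax_eq, hrange, List.foldl]
  set s := (pvPart '.' fname.toList).1 with hs
  set p1 := pvPart '-' s with hp1
  set p2 := pvPart '-' p1.2 with hp2
  set p3 := pvPart '-' p2.2 with hp3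
  by_cases h1 : '-' ∈ s
  · by_cases h2 : '-' ∈ p1.2
    · by_cases h3 : '-' ∈ p2.2
      · by_cases h4 : '-' ∈ p3.2
        · simp [splitAux, h1, h2, h3, h4, ← hp1, ← hp2, ← hp3]
        · have e4 := pvPart_of_not_contains '-' p3.2 (by simpa using h4)
          simp [splitAux, h1, h2, h3, h4, e4, ← hp1, ← hp2, ← hp3]
      · have e3 := pvPart_of_not_contains '-' p2.2 (by simpa using h3)
        simp [splitAux, h1, h2, h3, hp3, e3, ← hp1, ← hp2]
    · have e2 := pvPart_of_not_contains '-' p1.2 (by simpa using h2)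
      simp [splitAux, h1, h2, hp2, hp3, e2, pvPart, ← hp1]
  · have e1 := pvPart_of_not_contains '-' s (by simpa using h1)
    simp [splitAux, h1, hp1, hp2, hp3, e1, pvPart]
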